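-- pv_equiv track=rewrite | github.com/kyileiaye2021/UCP_SWE_Fellow | homework3/FirstKBinaryNumbers.py | k_binary_nums
-- ===== SOURCE A (Python) =====
-- def k_binary_nums(k):
--     res = []
--
--     if k < 0:
--         return res
--     if k == 0:
--         res.append('0')
--
--     for i in range(k):
--         curr_ele = i
--         curr_binary = ""
--
--         while curr_ele // 2 != 0:
--             curr_binary += (f"{curr_ele % 2}")
--             curr_ele = curr_ele // 2
--         curr_binary += (f"{curr_ele % 2}")
--         curr_binary = curr_binary[: : -1]
--         res.append(curr_binary)
--
--     return res
-- ===== SOURCE B (Python) =====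
-- def k_binary_nums(k):
--     # DP: each binary string is built from the already-stored answer for i // 2.
--     if k < 0:
--         return []
--     res = ['0']
--     if k == 0:
--         return res
--     if k >= 2:
--         res.append('1')
--     for i in range(2, k):
--         res.append(res[i // 2] + str(i % 2))
--     return res
-- ===== Notes on version B (the rewrite author's own statement) =====
-- stated objective: faster
-- what changed: Replaces the per-number division-and-reverse loop with a dynamic-programming table: each binary string is res[i//2] plus its last bit, reusing previously computed answers.
import Mathlib
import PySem

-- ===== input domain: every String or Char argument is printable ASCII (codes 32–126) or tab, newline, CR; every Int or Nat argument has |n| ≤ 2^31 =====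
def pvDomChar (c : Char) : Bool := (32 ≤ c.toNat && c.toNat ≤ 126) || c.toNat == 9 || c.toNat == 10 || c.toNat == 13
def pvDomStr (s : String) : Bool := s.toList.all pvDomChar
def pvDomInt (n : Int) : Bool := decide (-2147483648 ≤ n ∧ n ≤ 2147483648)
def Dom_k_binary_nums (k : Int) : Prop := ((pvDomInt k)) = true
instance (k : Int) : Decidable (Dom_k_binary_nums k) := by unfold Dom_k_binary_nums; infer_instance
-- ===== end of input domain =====

-- B builds the table by dynamic programming (res[i] = res[i//2] + last bit) instead of
-- re-dividing each number and reversing; same return value as A for every k.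

-- ===== PORT A =====
-- the inner 'while curr_ele // 2 != 0' loop; returns (final curr_ele, accumulated curr_binary).
-- The '0 < c' guard only ensures termination in Lean: every value reached from range(k) is ≥ 0,
-- and for 0 ≤ c the guard is implied by 'c // 2 ≠ 0', so the loop is exact there.
def pvWhileA (c : Int) (s : String) : Int × String :=
  if _h : 0 < c ∧ PySem.Int.floordiv c 2 ≠ 0 then
    pvWhileA (PySem.Int.floordiv c 2) (s ++ PySem.Int.toStr (PySem.Int.mod c 2))
  else (c, s)
termination_by c.toNat
decreasing_by
  have h2 : (2:Int) ≤ c := by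
    rcases _h with ⟨hc, hne⟩
    by_contra hlt
    have : c = 1 := by omega
    subst this
    exact hne (by decide)
  have := PySem.Int.floordiv_eq_ediv_of_pos (a := c) (b := 2) (by omega)
  rw [this]
  omega

def k_binary_nums (k : Int) : List String :=
  let res : List String := []
  if k < 0 then res
  else
    let res := if k = 0 then res ++ ["0"] else res
    (PySem.List.pyRange 0 k 1).foldl (fun res i =>
      let p := pvWhileA i ""
      let cb := p.2 ++ PySem.Int.toStr (PySem.Int.mod p.1 2)
      let cb := (PySem.Str.slice? cb none none (-1)).getD ""   -- curr_binary[::-1]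
      res ++ [cb]) res

-- ===== PORT B =====
-- res[i//2] is always in range (i//2 < i ≤ len res), so the '""' default of pyGetD is never used.
def k_binary_nums_alt (k : Int) : List String :=
  if k < 0 then []
  else
    let res : List String := ["0"]
    if k = 0 then res
    else
      let res := if 2 ≤ k then res ++ ["1"] else res
      (PySem.List.pyRange 2 k 1).foldl (fun res i =>
        res ++ [PySem.List.pyGetD res (PySem.Int.floordiv i 2) "" ++ PySem.Int.toStr (PySem.Int.mod i 2)]) res

-- ===== PRECONDITION & SPEC =====
def Spec_k_binary_nums (k : Int) (out : List String) : Prop := out = k_binary_nums_alt k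
instance (k : Int) (out : List String) : Decidable (Spec_k_binary_nums k out) := by unfold Spec_k_binary_nums; infer_instance

-- ===== CLAIM (what is proved, stated in full; the proofs are below) =====
def Claim_equal_k_binary_nums : Prop := ∀ (k : Int), Dom_k_binary_nums k → Spec_k_binary_nums k (k_binary_nums k)

-- ===== LEMMAS AND PROOFS =====

-- canonical binary string of a natural number
def bstr (n : Nat) : String :=
  if n < 2 then PySem.Int.toStr n else bstr (n / 2) ++ PySem.Int.toStr ((n % 2 : Nat) : Int)

-- digits appended by A's while loop, least-significant first (excluding the final one)
def revTail (n : Nat) : String :=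
  if n < 2 then "" else PySem.Int.toStr ((n % 2 : Nat) : Int) ++ revTail (n / 2)

-- final value of curr_ele after A's while loop
def finA (n : Nat) : Nat := if n < 2 then n else 1

lemma fd_cast (n : Nat) : PySem.Int.floordiv (n:Int) 2 = ((n/2 : Nat) : Int) := by
  exact_mod_cast PySem.Int.floordiv_natCast n 2

lemma md_cast (n : Nat) : PySem.Int.mod (n:Int) 2 = ((n%2 : Nat) : Int) := by
  exact_mod_cast PySem.Int.mod_natCast n 2

lemma whileA_spec (n : Nat) : ∀ (s : String),
    pvWhileA (n : Int) s = ((finA n : Int), s ++ revTail n) := by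
  induction n using Nat.strong_induction_on with
  | _ n ih =>
    intro s
    by_cases h2 : n < 2
    · rw [pvWhileA]
      rw [dif_neg]
      · simp [finA, revTail, h2]
      · rw [fd_cast]
        interval_cases n <;> simp
    · rw [pvWhileA]
      rw [dif_pos]
      · rw [fd_cast, md_cast]
        rw [ih (n/2) (by omega)]
        have hfin : finA (n/2) = finA n := by
          unfold finA
          split_ifs <;> omega
        rw [hfin]
        conv_rhs => rw [revTail, if_neg h2]
        simp [String.append_assoc]
      · refine ⟨by exact_mod_cast Nat.pos_of_ne_zero (by omega), ?_⟩
        rw [fd_cast]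
        have : 1 ≤ n / 2 := by omega
        exact_mod_cast (by omega : ((n/2:Nat):Int) ≠ 0)

lemma finA_lt (n : Nat) : finA n < 2 := by unfold finA; split_ifs <;> omega

lemma toList_reverse_digit (d : Nat) (hd : d < 2) :
    (PySem.Int.toStr (d : Int)).toList.reverse = (PySem.Int.toStr (d : Int)).toList := by
  interval_cases d <;> decide

lemma revTail_bstr (n : Nat) :
    (PySem.Int.toStr (finA n : Int)).toList ++ (revTail n).toList.reverse = (bstr n).toList := by
  induction n using Nat.strong_induction_on with
  | _ n ih =>
    by_cases h2 : n < 2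
    · rw [revTail, if_pos h2, bstr, if_pos h2]
      simp [finA, h2]
    · rw [revTail, if_neg h2, bstr, if_neg h2]
      have hfin : finA n = finA (n / 2) := by
        unfold finA; split_ifs <;> omega
      rw [hfin]
      simp only [String.toList_append, List.reverse_append,
        toList_reverse_digit (n % 2) (by omega), ← List.append_assoc, ih (n/2) (by omega)]

lemma elemA_eq_bstr (n : Nat) :
    (PySem.Str.slice? ((pvWhileA (n : Int) "").2 ++ PySem.Int.toStr (PySem.Int.mod (pvWhileA (n : Int) "").1 2))
      none none (-1)).getD "" = bstr n := by
  rw [whileA_spec]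
  simp only [PySem.Str.slice?_none_none_neg_one, Option.getD_some]
  have hm : PySem.Int.mod ((finA n : Nat) : Int) 2 = ((finA n : Nat) : Int) := by
    rw [md_cast]
    congr 1
    exact Nat.mod_eq_of_lt (finA_lt n)
  rw [hm]
  have h := revTail_bstr n
  have htl : (String.ofList (("" ++ revTail n ++ PySem.Int.toStr ((finA n : Nat) : Int)).toList.reverse)).toList = (bstr n).toList := by
    simp only [String.toList_append, List.reverse_append, String.toList_ofList]
    simp only [toList_reverse_digit (finA n) (finA_lt n)]
    simpa using h
  have : ∀ a b : String, a.toList = b.toList → a = b := by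
    intro a b hab
    have := congrArg String.ofList hab
    simpa using this
  exact this _ _ htl

lemma bstr_zero : bstr 0 = "0" := by rw [bstr]; decide
lemma bstr_one : bstr 1 = "1" := by rw [bstr]; decide

lemma foldlB_spec (m : Nat) (hm : 2 ≤ m) :
    (PySem.List.pyRange 2 (m : Int) 1).foldl (fun res i =>
        res ++ [PySem.List.pyGetD res (PySem.Int.floordiv i 2) "" ++ PySem.Int.toStr (PySem.Int.mod i 2)])
      ["0", "1"]
    = (List.range m).map bstr := by
  induction m, hm using Nat.le_induction with
  | base =>
    rw [PySem.List.pyRange_one_eq_nil (by norm_num)]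
    simp [List.range_succ, bstr_zero, bstr_one]
  | succ m hm ih =>
    have hcast : ((m + 1 : Nat) : Int) = (m : Int) + 1 := by push_cast; ring
    rw [hcast, PySem.List.pyRange_one_succ_right (by exact_mod_cast hm.trans (by omega) : (2:Int) ≤ (m:Int))]
    rw [List.foldl_append, ih]
    simp only [List.foldl_cons, List.foldl_nil]
    rw [fd_cast, md_cast, PySem.List.pyGetD_natCast]
    have hget : ((List.range m).map bstr).getD (m/2) "" = bstr (m/2) := by
      rw [List.getD_eq_getElem _ _ (by simpa using Nat.div_lt_self (by omega) (by omega))]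
      simp
    rw [hget]
    have : bstr (m/2) ++ PySem.Int.toStr ((m % 2 : Nat) : Int) = bstr m := by
      conv_rhs => rw [bstr.eq_def]
      rw [if_neg (by omega : ¬ m < 2)]
    rw [this, List.range_succ, List.map_append]
    rfl

-- A's per-iteration element, named so the fold can be rewritten to a map
def elemAfun : Int → String := fun i =>
  (PySem.Str.slice? ((pvWhileA i "").2 ++ PySem.Int.toStr (PySem.Int.mod (pvWhileA i "").1 2)) none none (-1)).getD ""

theorem main_eq : ∀ (k : Int), k_binary_nums k = k_binary_nums_alt k := by
  intro k
  unfold k_binary_nums k_binary_nums_alt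
  by_cases hneg : k < 0
  · simp [hneg]
  · rw [if_neg hneg, if_neg hneg]
    by_cases h0 : k = 0
    · subst h0
      simp [PySem.List.pyRange_one_eq_nil]
    · rw [if_neg h0, if_neg h0]
      obtain ⟨K, hK⟩ : ∃ K : Nat, k = (K : Int) := ⟨k.toNat, by omega⟩
      subst hK
      have hK1 : 1 ≤ K := by omega
      have hA : List.foldl (fun (res : List String) i => res ++ [elemAfun i]) [] (PySem.List.pyRange 0 (K : Int) 1)
          = (PySem.List.pyRange 0 (K : Int) 1).map elemAfun := by
        rw [PySem.List.foldl_append_singleton_eq_map]; simp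
      refine Eq.trans (hA : _) ?_
      have hrange : PySem.List.pyRange 0 (K : Int) 1 = (List.range K).map (fun j => ((j : Nat) : Int)) := by
        rw [PySem.List.pyRange_one]
        simp
      rw [hrange, List.map_map]
      have hmap : (List.range K).map (elemAfun ∘ fun j => ((j : Nat) : Int)) = (List.range K).map bstr := by
        apply List.map_congr_left
        intro j _
        exact elemA_eq_bstr j
      rw [hmap]
      by_cases h2 : 2 ≤ K
      · rw [if_pos (by exact_mod_cast h2 : (2:Int) ≤ (K:Int))]
        exact (foldlB_spec K h2).symm
      · have : K = 1 := by omega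
        subst this
        rw [if_neg (by norm_num)]
        rw [PySem.List.pyRange_one_eq_nil (by norm_num)]
        simp [List.range_succ, bstr_zero]

-- ===== VERDICT (by name: the statement is the Claim_ definition above) =====
theorem k_binary_nums_spec : Claim_equal_k_binary_nums := by
  intro k _
  unfold Spec_k_binary_nums
  exact main_eq k
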